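-- pv_equiv track=rewrite | github.com/Lacamm/Etudes | IUT/1A/Python/P1/TP/TP4/Exo2-1.py | booleens
-- ===== SOURCE A (Python) =====
-- def booleens(taille):
--     """
--     Cette fonction a pour objectif d'initialiser une liste de booléens
--     Paramètres:
--         para1: la taille de la liste à créée
--     Résultat: une liste de booléenns
--     """
--     listeB = []
--
--     for n in range(taille):
--         if n == 0 or n == 1:
--             listeB.append(False)
--         else:
--             listeB.append(True)
--
--     return listeB
-- ===== SOURCE B (Python) =====
-- def booleens(taille):
--     return [False] * min(taille, 2) + [True] * max(taille - 2, 0)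
-- ===== Notes on version B (the rewrite author's own statement) =====
-- stated objective: simpler
-- what changed: Replaces the per-index loop with a branch by direct block construction: a clamped False-prefix [False]*min(taille,2) concatenated with a True-suffix [True]*max(taille-2,0).
import Mathlib
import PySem

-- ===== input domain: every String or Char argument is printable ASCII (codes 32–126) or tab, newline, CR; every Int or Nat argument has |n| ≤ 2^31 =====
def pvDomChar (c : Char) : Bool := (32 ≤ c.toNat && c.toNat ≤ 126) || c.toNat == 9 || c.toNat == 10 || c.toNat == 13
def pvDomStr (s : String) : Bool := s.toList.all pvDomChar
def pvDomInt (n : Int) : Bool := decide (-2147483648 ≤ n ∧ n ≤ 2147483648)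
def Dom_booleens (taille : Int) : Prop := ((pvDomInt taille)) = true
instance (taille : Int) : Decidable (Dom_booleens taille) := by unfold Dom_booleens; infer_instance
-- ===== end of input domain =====

set_option maxRecDepth 2000


-- B builds the list from two homogeneous blocks instead of looping with a branch ('simpler').

-- ===== PORT A =====
-- loop over range(taille), appending False for n in {0,1}, True otherwise
def booleens (taille : Int) : List Bool :=
  (PySem.List.pyRange 0 taille 1).foldl
    (fun listeB n => if n = 0 ∨ n = 1 then listeB ++ [false] else listeB ++ [true]) []

-- ===== PORT B =====
-- [False]*min(taille,2) + [True]*max(taille-2,0)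
def booleens_alt (taille : Int) : List Bool :=
  List.replicate (min taille 2).toNat false ++ List.replicate (max (taille - 2) 0).toNat true

-- ===== PRECONDITION & SPEC =====
def Spec_booleens (taille : Int) (out : List Bool) : Prop := out = booleens_alt taille
instance (taille : Int) (out : List Bool) : Decidable (Spec_booleens taille out) := by unfold Spec_booleens; infer_instance

-- ===== CLAIM (what is proved, stated in full; the proofs are below) =====
def Claim_equal_booleens : Prop := ∀ (taille : Int), Dom_booleens taille → Spec_booleens taille (booleens taille)

-- ===== LEMMAS AND PROOFS =====

theorem booleens_nat (m : Nat) :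
    booleens (m : Int) = booleens_alt (m : Int) := by
  induction m with
  | zero => decide
  | succ k ih =>
    have hstep : booleens ((k + 1 : Nat) : Int)
        = booleens (k : Int)
          ++ (if (k : Int) = 0 ∨ (k : Int) = 1 then [false] else [true]) := by
      unfold booleens
      have h : PySem.List.pyRange 0 ((k + 1 : Nat) : Int) 1
          = PySem.List.pyRange 0 (k : Int) 1 ++ [(k : Int)] := by
        rw [show ((k + 1 : Nat) : Int) = (k : Int) + 1 by push_cast; ring]
        exact PySem.List.pyRange_one_succ_right (by exact_mod_cast Nat.zero_le k)
      rw [h, List.foldl_append]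
      simp only [List.foldl_cons, List.foldl_nil]
      split_ifs <;> rfl
    rw [hstep, ih]
    unfold booleens_alt
    rcases Nat.lt_or_ge k 2 with hk | hk
    · rcases k with _ | _ | k
      · rfl
      · rfl
      · omega
    · have h1 : (min ((k + 1 : Nat) : Int) 2).toNat = 2 := by omega
      have h2 : (min (k : Int) 2).toNat = 2 := by omega
      have h3 : (max (((k + 1 : Nat) : Int) - 2) 0).toNat
          = (max ((k : Int) - 2) 0).toNat + 1 := by omega
      have h4 : ¬((k : Int) = 0 ∨ (k : Int) = 1) := by omega
      rw [h1, h2, h3, if_neg h4]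
      simp [List.replicate_succ']

-- ===== VERDICT (by name: the statement is the Claim_ definition above) =====
theorem booleens_spec : Claim_equal_booleens := by
  intro taille _
  unfold Spec_booleens
  by_cases h : 0 ≤ taille
  · obtain ⟨m, rfl⟩ := Int.eq_ofNat_of_zero_le h
    exact booleens_nat m
  · have h : taille < 0 := by omega
    have hA : booleens taille = [] := by
      unfold booleens
      rw [PySem.List.pyRange_one, show ((taille - 0).toNat = 0) by omega]
      rfl
    have hB : booleens_alt taille = [] := by
      unfold booleens_alt
      have : (min taille 2).toNat = 0 := by omega
      have : (max (taille - 2) 0).toNat = 0 := by omega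
      simp_all
    rw [hA, hB]
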